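-- pv_equiv track=rewrite | github.com/Jena-K/study_python | E.C.T/p332.ChickenDeliver.py | chck_dist
-- ===== SOURCE A (Python) =====
-- def chck_dist(dist, comb):
--     arr = []
--     result = 0
--     for i in comb:
--         arr.append(dist[i])
--     for i in range(len(dist[0])):
--         result+=min([j[i] for j in arr])
--     return result
-- ===== SOURCE B (Python) =====
-- def chck_dist(dist, comb):
--     m = len(dist[0])
--     best = [dist[comb[0]][h] for h in range(m)]
--     for i in comb[1:]:
--         row = dist[i]
--         best = [min(best[h], row[h]) for h in range(m)]
--     return sum(best)
-- ===== Notes on version B (the rewrite author's own statement) =====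
-- stated objective: alternative
-- what changed: B folds over the selected restaurants maintaining a running per-house minimum vector and sums it, instead of A's building the list of selected rows and then scanning one column comprehension per house.
import Mathlib
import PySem

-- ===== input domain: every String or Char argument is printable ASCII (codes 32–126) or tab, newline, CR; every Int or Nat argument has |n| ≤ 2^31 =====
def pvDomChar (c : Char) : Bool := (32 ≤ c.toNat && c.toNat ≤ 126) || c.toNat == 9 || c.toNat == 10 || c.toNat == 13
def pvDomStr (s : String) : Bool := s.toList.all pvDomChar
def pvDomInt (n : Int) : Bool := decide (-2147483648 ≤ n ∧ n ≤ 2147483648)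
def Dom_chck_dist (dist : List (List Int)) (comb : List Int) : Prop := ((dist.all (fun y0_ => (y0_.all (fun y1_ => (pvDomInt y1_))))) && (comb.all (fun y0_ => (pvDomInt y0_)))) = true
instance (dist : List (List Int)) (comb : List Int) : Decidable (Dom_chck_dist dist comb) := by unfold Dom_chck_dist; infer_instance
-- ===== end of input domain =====

-- B replaces A's per-column scans of a transposed row list by one fold over the
-- selected restaurants that maintains a running per-house minimum vector (objective: alternative decomposition).

-- ===== PORT A =====
-- arr = []; for i in comb: arr.append(dist[i])
-- for i in range(len(dist[0])): result += min([j[i] for j in arr])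
def chck_dist (dist : List (List Int)) (comb : List Int) : Int :=
  let arr : List (List Int) :=
    comb.foldl (fun acc i => acc ++ [(PySem.List.pyGet? dist i).getD []]) []
  (PySem.List.pyRange 0 ((dist.headD []).length : Int) 1).foldl
    (fun result i =>
      result + ((PySem.List.min? (arr.map (fun j => PySem.List.pyGetD j i 0)) (fun x => x)).getD 0)) 0

-- ===== PORT B =====
-- m = len(dist[0]); best = [dist[comb[0]][h] for h in range(m)]
-- for i in comb[1:]: row = dist[i]; best = [min(best[h], row[h]) for h in range(m)]
-- return sum(best)
def chck_dist_alt (dist : List (List Int)) (comb : List Int) : Int :=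
  let m : Int := ((dist.headD []).length : Int)
  let best0 : List Int :=
    (PySem.List.pyRange 0 m 1).map
      (fun h => PySem.List.pyGetD ((PySem.List.pyGet? dist (comb.headD 0)).getD []) h 0)
  let best : List Int :=
    (PySem.List.slice comb (some 1) none).foldl
      (fun best i =>
        let row := (PySem.List.pyGet? dist i).getD []
        (PySem.List.pyRange 0 m 1).map
          (fun h => min (PySem.List.pyGetD best h 0) (PySem.List.pyGetD row h 0)))
      best0
  best.sum

-- ===== PRECONDITION & SPEC =====
-- Pre_ admits exactly the inputs on which A returns: dist non-empty, every index of
-- comb valid for dist with its row at least len(dist[0]) long, and comb non-empty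
-- unless dist[0] is empty (min([]) raises ValueError when the column loop runs).
def Pre_chck_dist (dist : List (List Int)) (comb : List Int) : Prop :=
  dist ≠ [] ∧
  (comb ≠ [] ∨ (dist.headD []).length = 0) ∧
  ∀ i ∈ comb, ∃ row, PySem.List.pyGet? dist i = some row ∧ (dist.headD []).length ≤ row.length
instance (dist : List (List Int)) (comb : List Int) : Decidable (Pre_chck_dist dist comb) := by
  unfold Pre_chck_dist; infer_instance

def pvWitness_chck_dist : List (List Int) × List Int := ([[1, 2], [3, 0]], [0, 1])

def Spec_chck_dist (dist : List (List Int)) (comb : List Int) (out : Int) : Prop := out = chck_dist_alt dist comb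
instance (dist : List (List Int)) (comb : List Int) (out : Int) : Decidable (Spec_chck_dist dist comb out) := by unfold Spec_chck_dist; infer_instance

-- ===== CLAIM (what is proved, stated in full; the proofs are below) =====
def Claim_equal_chck_dist : Prop := ∀ (dist : List (List Int)) (comb : List Int), Dom_chck_dist dist comb → Pre_chck_dist dist comb → Spec_chck_dist dist comb (chck_dist dist comb)

-- ===== LEMMAS AND PROOFS =====

-- B's inner update comprehension applied to a range-comprehension vector is pointwise.
theorem pv_step_map (m : Int) (f g : Int → Int) :
    (PySem.List.pyRange 0 m 1).map
      (fun h => min (PySem.List.pyGetD ((PySem.List.pyRange 0 m 1).map f) h 0) (g h))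
      = (PySem.List.pyRange 0 m 1).map (fun h => min (f h) (g h)) := by
  apply List.map_congr_left
  intro h hh
  rw [PySem.List.mem_pyRange_one] at hh
  rw [PySem.List.pyGetD_map_pyRange_of_nonneg f m h 0 hh.1 hh.2]

-- B's fold over the remaining restaurants, starting from a pointwise vector, stays pointwise.
theorem pv_fold_map (dist : List (List Int)) (m : Int) (l : List Int) (f : Int → Int) :
    l.foldl
      (fun best i =>
        let row := (PySem.List.pyGet? dist i).getD []
        (PySem.List.pyRange 0 m 1).map
          (fun h => min (PySem.List.pyGetD best h 0) (PySem.List.pyGetD row h 0)))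
      ((PySem.List.pyRange 0 m 1).map f)
    = (PySem.List.pyRange 0 m 1).map
        (fun h => l.foldl
          (fun a i => min a (PySem.List.pyGetD ((PySem.List.pyGet? dist i).getD []) h 0)) (f h)) := by
  induction l generalizing f with
  | nil => simp
  | cons i t ih =>
    simp only [List.foldl_cons]
    rw [pv_step_map m f (fun h => PySem.List.pyGetD ((PySem.List.pyGet? dist i).getD []) h 0)]
    rw [ih]

theorem pv_arr_eq (dist : List (List Int)) (comb : List Int) :
    comb.foldl (fun acc i => acc ++ [(PySem.List.pyGet? dist i).getD []]) []
      = comb.map (fun i => (PySem.List.pyGet? dist i).getD []) := by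
  simpa using PySem.List.foldl_append_singleton_eq_map (fun i => (PySem.List.pyGet? dist i).getD []) comb []

-- ===== VERDICT (by name: the statement is the Claim_ definition above) =====
theorem chck_dist_spec : Claim_equal_chck_dist := by
  intro dist comb _ hpre
  unfold Spec_chck_dist chck_dist chck_dist_alt
  simp only [pv_arr_eq]
  rw [PySem.List.slice_from_one]
  cases comb with
  | nil =>
    rcases hpre with ⟨_, hc, _⟩
    rcases hc with hc | hm
    · exact absurd rfl hc
    · simp only [List.headD_eq_head?_getD] at hm
      simp [hm, PySem.List.pyRange_zero_nat]
  | cons c cs =>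
    simp only [List.map_cons, List.headD_cons, List.tail_cons]
    rw [pv_fold_map dist ((dist.headD []).length : Int) cs
      (fun h => PySem.List.pyGetD ((PySem.List.pyGet? dist c).getD []) h 0)]
    rw [PySem.List.foldl_add]
    rw [zero_add]
    congr 1
    apply List.map_congr_left
    intro h _
    simp only [List.map_cons, List.map_map, Function.comp_def]
    rw [PySem.List.min?_id_cons]
    simp only [Option.getD_some]
    rw [List.foldl_map]
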